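-- pv_equiv track=rewrite | github.com/MuhammadAdil006/CompetitiveProgramming | simple/spellcheck.py | solve
-- ===== SOURCE A (Python) =====
-- def solve(a):
--     dic = {}
--     dic['T'] = False
--     dic['i'] = False
--     dic['m'] = False
--     dic['u'] = False
--     dic['r'] = False
--
--     if len(a) != 5:
--         return "NO"
--     else:
--         for i in a:
--             if i in dic.keys():
--                 dic[i] = True
--             else:
--                 return "NO"
--     if False in dic.values():
--         return "NO"
--     else:
--         return "YES"
-- ===== SOURCE B (Python) =====
-- def solve(a):
--     return "YES" if sorted(a) == sorted("Timur") else "NO"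
-- ===== Notes on version B (the rewrite author's own statement) =====
-- stated objective: simpler
-- what changed: Replaced the five-flag dict with a per-character membership loop and final flag scan by a single sort-then-compare against sorted("Timur") (multiset equality).
import Mathlib
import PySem

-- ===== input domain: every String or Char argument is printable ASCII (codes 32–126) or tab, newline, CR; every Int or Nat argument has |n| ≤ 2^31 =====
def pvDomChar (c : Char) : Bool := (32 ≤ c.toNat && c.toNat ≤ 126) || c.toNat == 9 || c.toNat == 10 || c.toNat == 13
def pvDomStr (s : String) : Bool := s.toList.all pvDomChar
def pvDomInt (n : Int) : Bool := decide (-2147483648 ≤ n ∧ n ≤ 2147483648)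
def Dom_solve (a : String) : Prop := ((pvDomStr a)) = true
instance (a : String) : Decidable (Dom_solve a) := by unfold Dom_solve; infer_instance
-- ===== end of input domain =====

-- B replaces A's five-flag dict + membership loop + flag scan by sorted(a) == sorted("Timur"); objective: simpler.

-- ===== PORT A =====
-- the for-loop with its early 'return "NO"' (none = early return)
def solveLoop : List Char → PySem.Dict Char Bool → Option (PySem.Dict Char Bool)
  | [], dic => some dic
  | i :: rest, dic =>
      if dic.keys.contains i then solveLoop rest (dic.insert i true)
      else none

def solve (a : String) : String :=
  let dic := ((((PySem.Dict.empty.insert 'T' false).insert 'i' false).insert 'm'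
      false).insert 'u' false).insert 'r' false
  if PySem.Str.len a ≠ 5 then "NO"
  else
    match solveLoop a.toList dic with
    | none => "NO"
    | some dic =>
        if dic.values.contains false then "NO" else "YES"

-- ===== PORT B =====
def solve_alt (a : String) : String :=
  if PySem.List.sorted a.toList (fun x => x) false
      = PySem.List.sorted "Timur".toList (fun x => x) false then "YES" else "NO"

-- ===== PRECONDITION & SPEC =====
def Spec_solve (a : String) (out : String) : Prop := out = solve_alt a
instance (a : String) (out : String) : Decidable (Spec_solve a out) := by unfold Spec_solve; infer_instance

-- ===== CLAIM (what is proved, stated in full; the proofs are below) =====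
def Claim_equal_solve : Prop := ∀ (a : String), Dom_solve a → Spec_solve a (solve a)

-- ===== LEMMAS AND PROOFS =====

-- the dict state is always the five flags in fixed key order
def flagDict (b1 b2 b3 b4 b5 : Bool) : PySem.Dict Char Bool :=
  PySem.Dict.mk [('T', b1), ('i', b2), ('m', b3), ('u', b4), ('r', b5)]

lemma loop_spec (L : List Char) (b1 b2 b3 b4 b5 : Bool) :
    solveLoop L (flagDict b1 b2 b3 b4 b5) =
      if L.all (fun c => c ∈ ['T', 'i', 'm', 'u', 'r']) then
        some (flagDict (b1 || L.contains 'T') (b2 || L.contains 'i')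
          (b3 || L.contains 'm') (b4 || L.contains 'u') (b5 || L.contains 'r'))
      else none := by
  induction L generalizing b1 b2 b3 b4 b5 with
  | nil => simp [solveLoop, flagDict]
  | cons c rest ih =>
    by_cases hc : c ∈ ['T', 'i', 'm', 'u', 'r']
    · simp only [List.mem_cons, List.not_mem_nil, or_false] at hc
      rcases hc with rfl | rfl | rfl | rfl | rfl
      · rw [show solveLoop ('T' :: rest) (flagDict b1 b2 b3 b4 b5)
            = solveLoop rest (flagDict true b2 b3 b4 b5) from by
              simp [solveLoop, flagDict, PySem.Dict.insert], ih]
        simp [flagDict, List.all_cons]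
      · rw [show solveLoop ('i' :: rest) (flagDict b1 b2 b3 b4 b5)
            = solveLoop rest (flagDict b1 true b3 b4 b5) from by
              simp [solveLoop, flagDict, PySem.Dict.insert], ih]
        simp [flagDict, List.all_cons]
      · rw [show solveLoop ('m' :: rest) (flagDict b1 b2 b3 b4 b5)
            = solveLoop rest (flagDict b1 b2 true b4 b5) from by
              simp [solveLoop, flagDict, PySem.Dict.insert], ih]
        simp [flagDict, List.all_cons]
      · rw [show solveLoop ('u' :: rest) (flagDict b1 b2 b3 b4 b5)
            = solveLoop rest (flagDict b1 b2 b3 true b5) from by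
              simp [solveLoop, flagDict, PySem.Dict.insert], ih]
        simp [flagDict, List.all_cons]
      · rw [show solveLoop ('r' :: rest) (flagDict b1 b2 b3 b4 b5)
            = solveLoop rest (flagDict b1 b2 b3 b4 true) from by
              simp [solveLoop, flagDict, PySem.Dict.insert], ih]
        simp [flagDict, List.all_cons]
    · have hc' : ¬ (c = 'T' ∨ c = 'i' ∨ c = 'm' ∨ c = 'u' ∨ c = 'r') := by simpa using hc
      simp only [solveLoop]
      rw [if_neg (by simp [flagDict]; simpa using hc)]
      simp [hc']

lemma perm_iff (L : List Char) (h5 : L.length = 5) :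
    ('T' ∈ L ∧ 'i' ∈ L ∧ 'm' ∈ L ∧ 'u' ∈ L ∧ 'r' ∈ L)
    ↔ L.Perm ['T', 'i', 'm', 'u', 'r'] := by
  constructor
  · rintro ⟨hT, hi, hm, hu, hr⟩
    have hsub : (['T', 'i', 'm', 'u', 'r'] : List Char) ⊆ L := by
      intro x hx; fin_cases hx <;> assumption
    have hnd : (['T', 'i', 'm', 'u', 'r'] : List Char).Nodup := by decide
    exact ((hnd.subperm hsub).perm_of_length_le (by simp [h5])).symm
  · intro hp
    refine ⟨?_, ?_, ?_, ?_, ?_⟩ <;> rw [hp.mem_iff] <;> decide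

-- ===== VERDICT (by name: the statement is the Claim_ definition above) =====
theorem solve_spec : Claim_equal_solve := by
  intro a _
  unfold Spec_solve solve solve_alt
  have hdic : ((((PySem.Dict.empty.insert 'T' false).insert 'i' false).insert 'm'
      false).insert 'u' false).insert 'r' false = flagDict false false false false false := by
    decide
  simp only [hdic, loop_spec]
  rw [show ("Timur".toList) = (['T', 'i', 'm', 'u', 'r'] : List Char) from rfl]
  have hsorted := PySem.List.sorted_id_eq_sorted_id_iff_perm a.toList
    (['T', 'i', 'm', 'u', 'r'] : List Char)
  have hlenlist : a.toList.length = a.length := by simp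
  by_cases hp : a.toList.Perm ['T', 'i', 'm', 'u', 'r']
  · have h5 : a.toList.length = 5 := by simpa using hp.length_eq
    have h5' : (a.length : Int) = 5 := by omega
    have hall' : ∀ x ∈ a.toList, x = 'T' ∨ x = 'i' ∨ x = 'm' ∨ x = 'u' ∨ x = 'r' := by
      intro x hx
      simpa using hp.mem_iff.mp hx
    obtain ⟨hT, hi, hm, hu, hr⟩ := (perm_iff a.toList h5).mpr hp
    simp [h5', hsorted, hp]
    rw [if_pos hall']
    simp [flagDict, hT, hi, hm, hu, hr]
  · by_cases h5 : a.toList.length = 5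
    · have h5' : (a.length : Int) = 5 := by omega
      by_cases hall' : ∀ x ∈ a.toList, x = 'T' ∨ x = 'i' ∨ x = 'm' ∨ x = 'u' ∨ x = 'r'
      · have hflags : ¬ ('T' ∈ a.toList ∧ 'i' ∈ a.toList ∧ 'm' ∈ a.toList ∧
            'u' ∈ a.toList ∧ 'r' ∈ a.toList) := fun h => hp ((perm_iff a.toList h5).mp h)
        simp only [not_and_or] at hflags
        rcases hflags with h | h | h | h | h <;>
          · simp [h5', hsorted, hp]
            rw [if_pos hall']
            simp [flagDict, h]
      · simp [h5', hall', hsorted, hp]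
    · have h5' : ¬ ((a.length : Int) = 5) := by omega
      simp [h5', hsorted, hp]
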